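-- pv_equiv track=rewrite | github.com/ctiley/CERN_CMS_Silicon_Sensor | Diodes/Halfmoon/Diodes/Code/cumulative_data.py | fit_endpoint_finder
-- ===== SOURCE A (Python) =====
-- def fit_endpoint_finder(data, fit_bias_values):
--
--     data_len = len(data)
--     fit_stop = [0,0]
--
--     if abs(data[data_len - 1]) >= 1000:
--
--         fit_bias_values[1] = data[data_len]
--
--     for i in range(0, data_len):
--
--         if abs(data[i]) <= abs(fit_bias_values[0]):
--
--             fit_stop[0] = i
--
--         if abs(data[i]) >= abs(fit_bias_values[1]):
--
--             fit_stop[1] = i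
--
--             return fit_stop
-- ===== SOURCE B (Python) =====
-- def fit_endpoint_finder(data, fit_bias_values):
--     stop_thr = abs(fit_bias_values[1])
--     start_thr = abs(fit_bias_values[0])
--
--     # first pass: first index whose value reaches the stop threshold
--     ret = None
--     for i in range(len(data)):
--         if abs(data[i]) >= stop_thr:
--             ret = i
--             break
--     if ret is None:
--         return None
--
--     # second pass: last index in the prefix [0..ret] at or below the start threshold
--     start = 0
--     for i in range(ret + 1):
--         if abs(data[i]) <= start_thr:
--             start = i
--     return [start, ret]
-- ===== Notes on version B (the rewrite author's own statement) =====
-- stated objective: simpler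
-- what changed: Replaces A's single fused loop carrying a mutable fit_stop pair (and its dead IndexError guard) by two plain scans: first find the stop index, then rescan the prefix for the last start index.
import Mathlib
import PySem

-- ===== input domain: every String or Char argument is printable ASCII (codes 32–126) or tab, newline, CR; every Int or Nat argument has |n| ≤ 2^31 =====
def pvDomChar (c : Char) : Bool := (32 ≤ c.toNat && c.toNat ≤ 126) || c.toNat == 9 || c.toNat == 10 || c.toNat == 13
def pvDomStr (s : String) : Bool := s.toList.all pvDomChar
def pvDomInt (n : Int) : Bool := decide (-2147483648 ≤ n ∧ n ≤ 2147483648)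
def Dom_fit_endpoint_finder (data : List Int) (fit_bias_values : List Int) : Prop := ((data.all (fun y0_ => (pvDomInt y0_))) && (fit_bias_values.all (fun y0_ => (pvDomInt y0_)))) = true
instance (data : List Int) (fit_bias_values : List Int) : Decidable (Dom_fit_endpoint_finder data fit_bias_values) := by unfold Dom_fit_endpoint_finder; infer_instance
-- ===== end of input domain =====

-- B replaces A's single fused loop (mutable fit_stop pair plus a dead IndexError guard) by two
-- independent scans: find the stop index first, then rescan the prefix for the start index (simpler).
-- ===== PORT A =====
-- the for-loop of A: i is the current index, s0 the current fit_stop[0]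
def fitA_go (t0 t1 : Int) (s0 i : Int) : List Int → Option (List Int)
  | [] => none
  | x :: rest =>
      let s0' := if |x| ≤ |t0| then i else s0
      if |x| ≥ |t1| then some [s0', i] else fitA_go t0 t1 s0' (i + 1) rest

def fit_endpoint_finder (data : List Int) (fit_bias_values : List Int) : Option (List Int) :=
  match data.getLast? with
  | none => none            -- data[-1] raises IndexError (outside Pre_)
  | some lastv =>
    if |lastv| ≥ 1000 then none   -- data[data_len] raises IndexError (outside Pre_)
    else
      match fit_bias_values with
      | t0 :: t1 :: _ => fitA_go t0 t1 0 0 data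
      | _ => none           -- fit_bias_values[0]/[1] raises IndexError (outside Pre_)

-- ===== PORT B =====
-- first pass of B: first index whose value reaches the stop threshold
def fitB_first (thr : Int) (i : Int) : List Int → Option Int
  | [] => none
  | x :: rest => if |x| ≥ thr then some i else fitB_first thr (i + 1) rest

-- second pass of B: last index at or below the start threshold, default `acc`
def fitB_last (thr : Int) (i acc : Int) : List Int → Int
  | [] => acc
  | x :: rest => fitB_last thr (i + 1) (if |x| ≤ thr then i else acc) rest

def fit_endpoint_finder_alt (data : List Int) (fit_bias_values : List Int) : Option (List Int) :=
  match fit_bias_values with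
  | [] => none              -- fit_bias_values[1] raises IndexError (outside Pre_)
  | [_] => none             -- fit_bias_values[1] raises IndexError (outside Pre_)
  | t0 :: t1 :: _ =>
    (fitB_first |t1| 0 data).map
      (fun ret => [fitB_last |t0| 0 0 (data.take (ret + 1).toNat), ret])

-- ===== PRECONDITION & SPEC =====
-- Pre_ excludes exactly the inputs where the Python A raises IndexError: empty data (data[-1]),
-- |last element| >= 1000 (the guard evaluates data[len(data)]), or fewer than two bias values.
def Pre_fit_endpoint_finder (data : List Int) (fit_bias_values : List Int) : Prop :=
  data ≠ [] ∧ 2 ≤ fit_bias_values.length ∧ |data.getLastD 0| < 1000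
instance (data : List Int) (fit_bias_values : List Int) : Decidable (Pre_fit_endpoint_finder data fit_bias_values) := by unfold Pre_fit_endpoint_finder; infer_instance
def pvWitness_fit_endpoint_finder : List Int × List Int := ([3, 7, 40], [5, 30])

def Spec_fit_endpoint_finder (data : List Int) (fit_bias_values : List Int) (out : Option (List Int)) : Prop := out = fit_endpoint_finder_alt data fit_bias_values
instance (data : List Int) (fit_bias_values : List Int) (out : Option (List Int)) : Decidable (Spec_fit_endpoint_finder data fit_bias_values out) := by unfold Spec_fit_endpoint_finder; infer_instance

-- ===== CLAIM (what is proved, stated in full; the proofs are below) =====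
def Claim_equal_fit_endpoint_finder : Prop := ∀ (data : List Int) (fit_bias_values : List Int), Dom_fit_endpoint_finder data fit_bias_values → Pre_fit_endpoint_finder data fit_bias_values → Spec_fit_endpoint_finder data fit_bias_values (fit_endpoint_finder data fit_bias_values)
-- ===== LEMMAS AND PROOFS =====
theorem fitB_first_ge (t1 i : Int) (l : List Int) {r : Int}
    (h : fitB_first t1 i l = some r) : i ≤ r := by
  induction l generalizing i with
  | nil => simp [fitB_first] at h
  | cons x rest ih =>
      simp only [fitB_first] at h
      split at h
      · simp only [Option.some.injEq] at h
        omega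
      · have := ih (i := i + 1) h
        omega

theorem fitA_eq_B (t0 t1 : Int) (l : List Int) (i s0 : Int) :
    fitA_go t0 t1 s0 i l =
      (fitB_first |t1| i l).map
        (fun ret => [fitB_last |t0| i s0 (l.take (ret - i + 1).toNat), ret]) := by
  induction l generalizing i s0 with
  | nil => simp [fitA_go, fitB_first]
  | cons x rest ih =>
      by_cases hstop : |x| ≥ |t1|
      · have h1 : (1 : Int).toNat = 1 := rfl
        simp [fitA_go, fitB_first, hstop, fitB_last, h1]
      · simp only [fitA_go, fitB_first]
        rw [if_neg hstop, if_neg hstop, ih]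
        cases hf : fitB_first |t1| (i + 1) rest with
        | none => simp
        | some ret =>
            simp only [Option.map_some]
            have hle : i + 1 ≤ ret := fitB_first_ge _ _ _ hf
            have htn : (ret - i + 1).toNat = (ret - (i + 1) + 1).toNat + 1 := by omega
            have hexp : List.take (ret - i + 1).toNat (x :: rest)
                = x :: List.take (ret - (i + 1) + 1).toNat rest := by
              rw [htn, List.take_succ_cons]
            simp only [hexp, fitB_last]

-- ===== VERDICT (by name: the statement is the Claim_ definition above) =====
theorem fit_endpoint_finder_spec : Claim_equal_fit_endpoint_finder := by
  intro data fbv _ hpre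
  obtain ⟨hne, hlen, hsmall⟩ := hpre
  unfold Spec_fit_endpoint_finder fit_endpoint_finder fit_endpoint_finder_alt
  match fbv, hlen with
  | t0 :: t1 :: _, _ =>
    cases hlast : data.getLast? with
    | none => exact absurd (List.getLast?_eq_none_iff.mp hlast) hne
    | some lastv =>
      have hg : data.getLastD 0 = lastv := by
        rw [List.getLastD_eq_getLast?, hlast]; rfl
      have hl : |lastv| < 1000 := hg ▸ hsmall
      have hge : ¬ |lastv| ≥ 1000 := by omega
      have hAB := fitA_eq_B t0 t1 data 0 0
      simp only [hge, if_false]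
      simpa using hAB
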